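-- pv_equiv track=rewrite | github.com/pypi-data/pypi-mirror-390 | packages/sleepscienceviewer/sleepscienceviewer-0.5.1-py3-none-any.whl/sleepscienceviewer/AnnotationXmlClass.py | summarize_sleep_stages
-- ===== SOURCE A (Python) =====
-- def summarize_sleep_stages(stage_list: list, stage_dict: dict[int, str]) -> dict[int | str, int | str]:
--     """
--     Generate a summary of sleep stage occurrences from a list of stages.
--
--     Creates a dictionary containing the count of occurrences for each sleep stage
--     defined in the stage dictionary. All stages from stage_dict are included in
--     the output, even if they have zero occurrences in stage_list.
--
--     Args:
--         stage_list: List of sleep stage names (strings) to be counted.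
--         stage_dict: Dictionary mapping integer stage codes to their string names.
--                Example: {0: 'Wake', 1: 'REM', 2: 'Light', 3: 'Deep'}
--
--     Returns:
--         Dictionary with sleep stage names as keys and their occurrence counts as values.
--         Example: {'Deep': 45, 'Light': 120, 'REM': 30, 'Wake': 15}
--     """
--     # Define Variables
--     stage_summary = {}
--     stage_keys = [stage_dict[x] for x in stage_dict.keys()]
--     stage_keys.sort()
--
--     # Create empty return dictionary to ensure all stages are included in retur
--     for stage in stage_keys:
--         stage_summary[stage] = 0
--
--     # Count number of entries for each stage
--     for stage in stage_keys:
--         stage_summary[stage] = sum([x == stage for x in stage_list])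
--     return stage_summary
-- ===== SOURCE B (Python) =====
-- def summarize_sleep_stages(stage_list: list, stage_dict: dict[int, str]) -> dict[int | str, int | str]:
--     # Initialise every stage name (sorted, as in the original output order) to 0,
--     # then tally stage_list in a single pass instead of one full scan per stage.
--     stage_summary = {name: 0 for name in sorted(stage_dict.values())}
--     for stage in stage_list:
--         if stage in stage_summary:
--             stage_summary[stage] += 1
--     return stage_summary
-- ===== Notes on version B (the rewrite author's own statement) =====
-- stated objective: faster
-- what changed: Replaces A's per-stage full scan of stage_list (one sum([...]) per stage, after a redundant zero-initialisation loop) with a single tally pass over stage_list that increments a pre-initialised counter dict.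
import Mathlib
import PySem

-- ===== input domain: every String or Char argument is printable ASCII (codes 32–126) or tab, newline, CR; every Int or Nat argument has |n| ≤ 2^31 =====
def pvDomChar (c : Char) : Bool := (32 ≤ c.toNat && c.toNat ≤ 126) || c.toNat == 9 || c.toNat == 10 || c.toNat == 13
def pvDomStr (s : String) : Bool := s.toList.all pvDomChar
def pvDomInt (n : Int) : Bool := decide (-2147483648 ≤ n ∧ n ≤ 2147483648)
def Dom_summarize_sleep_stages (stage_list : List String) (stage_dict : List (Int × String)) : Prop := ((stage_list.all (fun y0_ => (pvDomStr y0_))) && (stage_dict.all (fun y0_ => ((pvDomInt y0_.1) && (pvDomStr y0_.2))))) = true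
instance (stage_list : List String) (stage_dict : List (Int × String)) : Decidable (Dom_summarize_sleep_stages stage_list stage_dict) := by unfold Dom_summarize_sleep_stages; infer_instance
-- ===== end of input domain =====

-- B replaces A's per-stage full scan of stage_list with a single tally pass over a
-- pre-initialised counter dict (objective: faster, O(N + S log S) vs O(S·N + S log S)).


-- ===== PORT A =====
def summarize_sleep_stages (stage_list : List String) (stage_dict : List (Int × String)) : List (String × Int) :=
  let d := PySem.Dict.ofList stage_dict
  -- stage_keys = [stage_dict[x] for x in stage_dict.keys()]; x ∈ keys, so the lookup always hits (getD's default is never used)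
  let stage_keys0 := d.keys.map (fun x => d.getD x "")
  let stage_keys := PySem.List.sorted stage_keys0 (fun s => s) false
  let s1 := stage_keys.foldl (fun acc stage => acc.insert stage 0) (PySem.Dict.empty : PySem.Dict String Int)
  let s2 := stage_keys.foldl
    (fun acc stage => acc.insert stage ((stage_list.map (fun x => if x == stage then (1 : Int) else 0)).sum)) s1
  s2.items

-- ===== PORT B =====
def summarize_sleep_stages_alt (stage_list : List String) (stage_dict : List (Int × String)) : List (String × Int) :=
  let names := PySem.List.sorted (PySem.Dict.values (PySem.Dict.ofList stage_dict)) (fun s => s) false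
  let init := names.foldl (fun acc n => acc.insert n 0) (PySem.Dict.empty : PySem.Dict String Int)
  let tally := stage_list.foldl
    (fun acc stage => if acc.contains stage then acc.modify stage 0 (· + 1) else acc) init
  tally.items

-- ===== PRECONDITION & SPEC =====
def Spec_summarize_sleep_stages (stage_list : List String) (stage_dict : List (Int × String)) (out : List (String × Int)) : Prop := out = summarize_sleep_stages_alt stage_list stage_dict
instance (stage_list : List String) (stage_dict : List (Int × String)) (out : List (String × Int)) : Decidable (Spec_summarize_sleep_stages stage_list stage_dict out) := by unfold Spec_summarize_sleep_stages; infer_instance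

-- ===== CLAIM (what is proved, stated in full; the proofs are below) =====
def Claim_equal_summarize_sleep_stages : Prop := ∀ (stage_list : List String) (stage_dict : List (Int × String)), Dom_summarize_sleep_stages stage_list stage_dict → Spec_summarize_sleep_stages stage_list stage_dict (summarize_sleep_stages stage_list stage_dict)

-- ===== LEMMAS AND PROOFS =====

-- Set.update adds nothing when every element is already present.
theorem set_update_of_subset {α : Type} [BEq α] [LawfulBEq α] (l : List α) (s : PySem.Set α)
    (h : ∀ x ∈ l, x ∈ s) : PySem.Set.update s l = s := by
  induction l generalizing s with
  | nil => rfl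
  | cons x t ih =>
    have hx : x ∈ s := h x (by simp)
    have hadd : PySem.Set.add s x = s := by
      simp [PySem.Set.add, PySem.Set.contains, hx]
    simp only [PySem.Set.update, List.foldl_cons] at *
    rw [hadd]
    exact ih s (fun y hy => h y (by simp [hy]))

-- A fold of inserts whose value depends only on the key: the last write wins.
theorem getD_foldl_insert_const {ν : Type} (ks : List String) (v : String → ν)
    (d : PySem.Dict String ν) (k : String) (d0 : ν) :
    (ks.foldl (fun acc s => acc.insert s (v s)) d).getD k d0
      = if k ∈ ks then v k else d.getD k d0 := by
  induction ks generalizing d with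
  | nil => simp
  | cons x t ih =>
    simp only [List.foldl_cons, ih, PySem.Dict.getD_insert, List.mem_cons]
    by_cases hkt : k ∈ t <;> by_cases hkx : k = x <;> simp [hkt, hkx]

-- The guarded tally loop leaves the key set unchanged.
theorem keys_tally_loop (sl : List String) (d : PySem.Dict String Int) :
    (sl.foldl (fun acc s => if acc.contains s then acc.modify s 0 (· + 1) else acc) d).keys
      = d.keys := by
  induction sl generalizing d with
  | nil => rfl
  | cons x t ih =>
    simp only [List.foldl_cons]
    by_cases hc : d.contains x = true
    · rw [hc]
      simp only [if_true]
      rw [ih, PySem.Dict.keys_modify, PySem.Dict.keys_insert_of_contains d _ hc]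
    · simp only [Bool.not_eq_true] at hc
      rw [hc]
      simp only [Bool.false_eq_true, if_false]
      exact ih d

-- The guarded tally loop counts occurrences of each already-present key.
theorem getD_tally_loop (sl : List String) (d : PySem.Dict String Int) (k : String) :
    (sl.foldl (fun acc s => if acc.contains s then acc.modify s 0 (· + 1) else acc) d).getD k 0
      = d.getD k 0 + (if d.contains k then (sl.countP (· == k) : Int) else 0) := by
  induction sl generalizing d with
  | nil => simp
  | cons x t ih =>
    simp only [List.foldl_cons, List.countP_cons]
    by_cases hc : d.contains x = true
    · rw [hc]
      simp only [if_true, ih]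
      by_cases hkx : k = x
      · subst hkx
        simp [PySem.Dict.contains_modify, hc]
        omega
      · have hbe : ((x == k) = false) := by simp; exact fun h => hkx h.symm
        simp [PySem.Dict.contains_modify, PySem.Dict.getD_modify, hkx, hbe]
    · simp only [Bool.not_eq_true] at hc
      rw [hc]
      simp only [Bool.false_eq_true, if_false, ih]
      by_cases hkx : k = x
      · subst hkx; simp [hc]
      · have hbe : ((x == k) = false) := by simp; exact fun h => hkx h.symm
        simp [hbe]

theorem summarize_eq (stage_list : List String) (stage_dict : List (Int × String)) :
    summarize_sleep_stages stage_list stage_dict = summarize_sleep_stages_alt stage_list stage_dict := by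
  unfold summarize_sleep_stages summarize_sleep_stages_alt
  simp only []
  set d := PySem.Dict.ofList stage_dict with hd
  have hvals : d.keys.map (fun x => d.getD x "") = d.values :=
    (PySem.Dict.values_eq_map_keys d (PySem.Dict.nodup_keys_ofList stage_dict) "").symm
  rw [hvals]
  set ks := PySem.List.sorted d.values (fun s => s) false with hks
  -- the two result dicts
  set s2 := ks.foldl
    (fun acc stage => acc.insert stage ((stage_list.map (fun x => if x == stage then (1 : Int) else 0)).sum))
    (ks.foldl (fun acc stage => acc.insert stage 0) (PySem.Dict.empty : PySem.Dict String Int)) with hs2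
  set init := ks.foldl (fun acc n => acc.insert n 0) (PySem.Dict.empty : PySem.Dict String Int) with hinit
  set tally := stage_list.foldl
    (fun acc stage => if acc.contains stage then acc.modify stage 0 (· + 1) else acc) init with htally
  -- key sets
  have hupd : PySem.Set.update (PySem.Set.ofList ks) ks = PySem.Set.ofList ks :=
    set_update_of_subset ks _ (fun x hx => (PySem.Set.mem_ofList ks x).mpr hx)
  have hkeys_init : init.keys = PySem.Set.ofList ks := by
    rw [hinit, PySem.Dict.keys_foldl_insert ks (fun _ _ => 0)]
    simp [PySem.Dict.keys_empty, PySem.Set.update, PySem.Set.ofList_eq_foldl]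
  have hkeys_s2 : s2.keys = PySem.Set.ofList ks := by
    rw [hs2, PySem.Dict.keys_foldl_insert ks
      (fun _ stage => ((stage_list.map (fun x => if x == stage then (1 : Int) else 0)).sum))]
    have h1 : (ks.foldl (fun acc stage => acc.insert stage 0)
        (PySem.Dict.empty : PySem.Dict String Int)).keys = PySem.Set.ofList ks := hkeys_init
    rw [h1, hupd]
  have hkeys_tally : tally.keys = PySem.Set.ofList ks := by
    rw [htally, keys_tally_loop, hkeys_init]
  -- nodup
  have hnd_s2 : s2.keys.Nodup := by
    rw [hs2]
    exact PySem.Dict.nodup_keys_foldl_insert ks _ _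
      (PySem.Dict.nodup_keys_foldl_insert ks _ _ (by simp [PySem.Dict.keys_empty]))
  have hnd_tally : tally.keys.Nodup := by
    rw [hkeys_tally, ← hkeys_s2]; exact hnd_s2
  -- items via keys + values
  rw [PySem.Dict.items_eq_map_keys s2 hnd_s2 0, PySem.Dict.items_eq_map_keys tally hnd_tally 0,
    hkeys_s2, hkeys_tally]
  apply List.map_congr_left
  intro k hk
  have hkks : k ∈ ks := (PySem.Set.mem_ofList ks k).mp hk
  have hA : s2.getD k 0 = (stage_list.countP (· == k) : Int) := by
    rw [hs2, getD_foldl_insert_const, if_pos hkks]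
    exact PySem.List.sum_map_ite_one_zero (fun x => x == k) stage_list
  have hB : tally.getD k 0 = (stage_list.countP (· == k) : Int) := by
    rw [htally, getD_tally_loop]
    have h0 : init.getD k 0 = 0 := by
      rw [hinit, getD_foldl_insert_const]; simp [hkks]
    have hc : init.contains k = true := by
      rw [PySem.Dict.contains_iff_mem_keys, hkeys_init]
      exact hk
    rw [h0, hc]
    simp
  rw [hA, hB]

-- ===== VERDICT (by name: the statement is the Claim_ definition above) =====
theorem summarize_sleep_stages_spec : Claim_equal_summarize_sleep_stages := by
  intro stage_list stage_dict _
  unfold Spec_summarize_sleep_stages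
  exact summarize_eq stage_list stage_dict
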